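-- pv_equiv track=rewrite | github.com/RaysonSu/intcode | comp.py | compute_index
-- ===== SOURCE A (Python) =====
-- def compute_index(lines: list[str]) -> list[int]:
--     index = 0
--     indices = []
--     for row in lines:
--         indices.append(index)
--         first_token = row.split(" ")[0]
--
--         match first_token:
--             case "add" | "mul" | "ltn" | "ieq":
--                 index += 4
--             case "jfp" | "jfz":
--                 index += 3
--             case "inp" | "out" | "srb":
--                 index += 2
--             case "hlt" | "lit":
--                 index += 1
--             case _:
--                 pass
--
--     return indices
-- ===== SOURCE B (Python) =====
-- SIZES = {"add": 4, "mul": 4, "ltn": 4, "ieq": 4,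
--          "jfp": 3, "jfz": 3,
--          "inp": 2, "out": 2, "srb": 2,
--          "hlt": 1, "lit": 1}
--
-- def compute_index(lines: list[str]) -> list[int]:
--     # Each line's offset equals the total code length minus the length of the
--     # code from that line to the end.  So: compute the sizes, then the grand
--     # total, then walk the program BACKWARDS maintaining the remaining suffix
--     # length, and reverse the collected offsets at the end.
--     sizes = [SIZES.get(row.split(" ")[0], 0) for row in lines]
--     remaining = sum(sizes)
--     out = []
--     for s in reversed(sizes):
--         remaining -= s
--         out.append(remaining)
--     out.reverse()
--     return out
-- ===== Notes on version B (the rewrite author's own statement) =====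
-- stated objective: alternative
-- what changed: A accumulates offsets in one forward pass; B instead computes each line's size, the total code length, and then traverses the program BACKWARDS, deriving each offset as total minus the remaining suffix length, reversing the collected list at the end.
import Mathlib
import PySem

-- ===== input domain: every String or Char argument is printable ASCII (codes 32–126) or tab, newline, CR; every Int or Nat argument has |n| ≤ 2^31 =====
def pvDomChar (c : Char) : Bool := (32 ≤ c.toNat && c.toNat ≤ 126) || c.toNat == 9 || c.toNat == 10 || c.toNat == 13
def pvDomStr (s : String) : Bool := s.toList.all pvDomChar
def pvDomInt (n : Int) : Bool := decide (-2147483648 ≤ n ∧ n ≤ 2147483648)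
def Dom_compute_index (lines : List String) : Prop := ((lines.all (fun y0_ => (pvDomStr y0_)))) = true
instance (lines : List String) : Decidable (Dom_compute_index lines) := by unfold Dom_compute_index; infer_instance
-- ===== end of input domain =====

-- B replaces A's forward running-offset loop by a sizes table, the grand total, and a BACKWARD walk
-- subtracting suffix lengths (objective: alternative, same cost).

-- ===== PORT A =====
def compute_index (lines : List String) : List Int :=
  (lines.foldl (fun (st : Int × List Int) row =>
    let indices := st.2 ++ [st.1]
    let first_token := (((PySem.Str.split? row " ").getD []).headD "")
    let index :=
      if first_token = "add" ∨ first_token = "mul" ∨ first_token = "ltn" ∨ first_token = "ieq" then st.1 + 4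
      else if first_token = "jfp" ∨ first_token = "jfz" then st.1 + 3
      else if first_token = "inp" ∨ first_token = "out" ∨ first_token = "srb" then st.1 + 2
      else if first_token = "hlt" ∨ first_token = "lit" then st.1 + 1
      else st.1
    (index, indices)) (0, [])).2

-- ===== PORT B =====
def pvSIZES : PySem.Dict String Int :=
  PySem.Dict.ofList [("add", 4), ("mul", 4), ("ltn", 4), ("ieq", 4),
                     ("jfp", 3), ("jfz", 3),
                     ("inp", 2), ("out", 2), ("srb", 2),
                     ("hlt", 1), ("lit", 1)]

def compute_index_alt (lines : List String) : List Int :=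
  let sizes := lines.map (fun row => pvSIZES.getD (((PySem.Str.split? row " ").getD []).headD "") 0)
  let total := sizes.sum
  -- backward walk: 'remaining -= s; out.append(remaining)' over reversed(sizes), then out.reverse()
  ((sizes.reverse.foldl (fun (st : Int × List Int) s => (st.1 - s, st.2 ++ [st.1 - s])) (total, [])).2).reverse

-- ===== PRECONDITION & SPEC =====
def Spec_compute_index (lines : List String) (out : List Int) : Prop := out = compute_index_alt lines
instance (lines : List String) (out : List Int) : Decidable (Spec_compute_index lines out) := by unfold Spec_compute_index; infer_instance

-- ===== CLAIM =====
def Claim_equal_compute_index : Prop := ∀ (lines : List String), Dom_compute_index lines → Spec_compute_index lines (compute_index lines)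

-- ===== LEMMAS AND PROOFS =====
-- reference form: exclusive prefix scan of a sizes list starting at i
def pvScan (i : Int) : List Int → List Int
  | [] => []
  | s :: rest => i :: pvScan (i + s) rest

-- each line's size, as B looks it up
def pvSize (row : String) : Int :=
  pvSIZES.getD (((PySem.Str.split? row " ").getD []).headD "") 0

set_option maxHeartbeats 1000000 in
theorem pv_size_eq (t : String) :
    pvSIZES.getD t 0 =
      (if t = "add" ∨ t = "mul" ∨ t = "ltn" ∨ t = "ieq" then (4 : Int)
       else if t = "jfp" ∨ t = "jfz" then 3
       else if t = "inp" ∨ t = "out" ∨ t = "srb" then 2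
       else if t = "hlt" ∨ t = "lit" then 1
       else 0) := by
  have h : pvSIZES = PySem.Dict.mk [("add", 4), ("mul", 4), ("ltn", 4), ("ieq", 4),
      ("jfp", 3), ("jfz", 3), ("inp", 2), ("out", 2), ("srb", 2), ("hlt", 1), ("lit", 1)] := by decide
  rw [h]
  simp only [PySem.Dict.getD_eq_get?_getD, PySem.Dict.get?_mk_cons, beq_iff_eq]
  split_ifs <;> (try subst t) <;> simp_all [PySem.Dict.get?, eq_comm]

-- A's forward loop computes the exclusive prefix scan of the sizes
theorem pvA_foldl (lines : List String) : ∀ (i : Int) (acc : List Int),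
    (lines.foldl (fun (st : Int × List Int) row =>
      let indices := st.2 ++ [st.1]
      let first_token := (((PySem.Str.split? row " ").getD []).headD "")
      let index :=
        if first_token = "add" ∨ first_token = "mul" ∨ first_token = "ltn" ∨ first_token = "ieq" then st.1 + 4
        else if first_token = "jfp" ∨ first_token = "jfz" then st.1 + 3
        else if first_token = "inp" ∨ first_token = "out" ∨ first_token = "srb" then st.1 + 2
        else if first_token = "hlt" ∨ first_token = "lit" then st.1 + 1
        else st.1
      (index, indices)) (i, acc)).2 = acc ++ pvScan i (lines.map pvSize) := by
  induction lines with
  | nil => intro i acc; simp [pvScan]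
  | cons row rest ih =>
      intro i acc
      simp only [List.foldl_cons, List.map_cons, pvScan]
      rw [ih]
      have : (if (((PySem.Str.split? row " ").getD []).headD "") = "add" ∨ (((PySem.Str.split? row " ").getD []).headD "") = "mul" ∨ (((PySem.Str.split? row " ").getD []).headD "") = "ltn" ∨ (((PySem.Str.split? row " ").getD []).headD "") = "ieq" then i + 4
        else if (((PySem.Str.split? row " ").getD []).headD "") = "jfp" ∨ (((PySem.Str.split? row " ").getD []).headD "") = "jfz" then i + 3
        else if (((PySem.Str.split? row " ").getD []).headD "") = "inp" ∨ (((PySem.Str.split? row " ").getD []).headD "") = "out" ∨ (((PySem.Str.split? row " ").getD []).headD "") = "srb" then i + 2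
        else if (((PySem.Str.split? row " ").getD []).headD "") = "hlt" ∨ (((PySem.Str.split? row " ").getD []).headD "") = "lit" then i + 1
        else i) = i + pvSize row := by
        unfold pvSize; rw [pv_size_eq]; split_ifs <;> simp
      rw [this]; simp

-- B's backward loop, read through foldr: remaining total and collected (reversed) offsets
theorem pvB_foldr (sizes : List Int) : ∀ (t : Int) (acc : List Int),
    sizes.foldr (fun s (st : Int × List Int) => (st.1 - s, st.2 ++ [st.1 - s])) (t, acc)
      = (t - sizes.sum, acc ++ (pvScan (t - sizes.sum) sizes).reverse) := by
  induction sizes with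
  | nil => intro t acc; simp [pvScan]
  | cons s rest ih =>
      intro t acc
      simp only [List.foldr_cons, ih, pvScan, List.sum_cons, List.reverse_cons]
      have h2 : t - (s + rest.sum) + s = t - rest.sum := by ring
      have h1 : t - rest.sum - s = t - (s + rest.sum) := by ring
      rw [h2, h1]; simp

-- ===== VERDICT =====
theorem compute_index_spec : Claim_equal_compute_index := by
  intro lines _
  unfold Spec_compute_index compute_index compute_index_alt
  rw [pvA_foldl lines 0 []]
  have hfold := pvB_foldr (lines.map pvSize) (lines.map pvSize).sum []
  show [] ++ pvScan 0 (lines.map pvSize) =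
    (((lines.map pvSize).reverse.foldl (fun (st : Int × List Int) s => (st.1 - s, st.2 ++ [st.1 - s]))
      ((lines.map pvSize).sum, [])).2).reverse
  rw [List.foldl_reverse, hfold]
  simp
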